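-- pv_equiv track=rewrite | github.com/kazuhayase/study | GCJ/2022/Qualification/dx.py | solve
-- ===== SOURCE A (Python) =====
-- def solve(N, S):
--     S.sort()
--
--     i=0
--     s=1
--     while i<N:
--         if S[i]>=s:
--             s=s+1
--         i=i+1
--     return s-1
-- ===== SOURCE B (Python) =====
-- def solve(N, S):
--     # Sorts S in place (same side effect as A); returns the answer by a
--     # Hall-style feasibility scan from the largest element downward.
--     S.sort()
--     m = 0
--     prefmin = None
--     while m < N:
--         v = S[N - 1 - m] + m
--         prefmin = v if prefmin is None else min(prefmin, v)
--         if prefmin < m + 1: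
--             break
--         m += 1
--     return m
-- ===== Notes on version B (the rewrite author's own statement) =====
-- stated objective: alternative
-- what changed: Replaces A's ascending incremental-threshold greedy with a descending scan maintaining the prefix minimum of value+offset (Hall-style feasibility) that stops at the first infeasible prefix.
import Mathlib
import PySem

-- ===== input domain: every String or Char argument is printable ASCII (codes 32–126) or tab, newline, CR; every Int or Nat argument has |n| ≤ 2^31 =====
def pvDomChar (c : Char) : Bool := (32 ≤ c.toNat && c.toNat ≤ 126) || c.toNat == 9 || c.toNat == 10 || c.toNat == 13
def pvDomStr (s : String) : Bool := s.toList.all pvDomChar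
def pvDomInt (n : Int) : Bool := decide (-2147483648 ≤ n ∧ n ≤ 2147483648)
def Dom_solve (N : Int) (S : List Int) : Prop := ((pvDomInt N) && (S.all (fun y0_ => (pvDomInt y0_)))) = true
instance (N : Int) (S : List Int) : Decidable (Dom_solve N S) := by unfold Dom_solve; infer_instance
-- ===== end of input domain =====

-- B replaces A's ascending incremental-threshold greedy by a descending Hall-style
-- feasibility scan (prefix minimum of value+offset); equal cost, different algorithm.
-- Both Pythons sort S in place; the theorems below are about the return value.

-- ===== PORT A =====
-- while i<N: if S[i]>=s: s=s+1; i=i+1   (S[i] in range under Pre_solve)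
def solveLoopA (L : List Int) (N i s : Int) : Int :=
  if _h : i < N then
    solveLoopA L N (i + 1) (if PySem.List.pyGetD L i 0 ≥ s then s + 1 else s)
  else s
termination_by (N - i).toNat
decreasing_by omega

def solve (N : Int) (S : List Int) : Int :=
  let L := PySem.List.sorted S (fun x => x) false
  solveLoopA L N 0 1 - 1

-- ===== PORT B =====
-- while m<N: v=S[N-1-m]+m; prefmin=min so far; break when prefmin<m+1; return m
def solveLoopB (L : List Int) (N m : Int) (pm : Option Int) : Int :=
  if _h : m < N then
    let v := PySem.List.pyGetD L (N - 1 - m) 0 + m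
    let pm' := match pm with | none => v | some p => min p v
    if pm' < m + 1 then m else solveLoopB L N (m + 1) (some pm')
  else m
termination_by (N - m).toNat
decreasing_by omega

def solve_alt (N : Int) (S : List Int) : Int :=
  let L := PySem.List.sorted S (fun x => x) false
  solveLoopB L N 0 none

-- ===== PRECONDITION & SPEC =====
-- A raises IndexError when N > len(S); Pre_solve excludes exactly those inputs.
def Pre_solve (N : Int) (S : List Int) : Prop := N ≤ (S.length : Int)
instance (N : Int) (S : List Int) : Decidable (Pre_solve N S) := by unfold Pre_solve; infer_instance
def pvWitness_solve : Int × List Int := (3, [1, 2, 3])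

def Spec_solve (N : Int) (S : List Int) (out : Int) : Prop := out = solve_alt N S
instance (N : Int) (S : List Int) (out : Int) : Decidable (Spec_solve N S out) := by unfold Spec_solve; infer_instance

-- ===== CLAIM (what is proved, stated in full; the proofs are below) =====
def Claim_equal_solve : Prop := ∀ (N : Int) (S : List Int), Dom_solve N S → Pre_solve N S → Spec_solve N S (solve N S)

-- ===== LEMMAS AND PROOFS =====

-- A's loop body as a fold step
def gstep (s d : Int) : Int := if d ≥ s then s + 1 else s

-- B's loop, structurally on the reversed (descending) list
def goOpt : List Int → Int → Option Int → Int
  | [], m, _ => m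
  | v :: rest, m, pm =>
    let w := v + m
    let pm' := match pm with | none => w | some p => min p w
    if pm' < m + 1 then m else goOpt rest (m + 1) (some pm')

-- same loop with the prefix minimum always present
def cInt : List Int → Int → Int → Int
  | [], m, _ => m
  | v :: rest, m, pm =>
    let pm' := min pm (v + m)
    if pm' < m + 1 then m else cInt rest (m + 1) pm'

theorem goOpt_some (R : List Int) (m p : Int) : goOpt R m (some p) = cInt R m p := by
  induction R generalizing m p with
  | nil => rfl
  | cons v rest ih => simp only [goOpt, cInt]; split <;> simp [ih]

theorem cInt_ge (R : List Int) (m pm : Int) : m ≤ cInt R m pm := by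
  induction R generalizing m pm with
  | nil => simp [cInt]
  | cons v rest ih =>
    simp only [cInt]; split
    · omega
    · exact le_trans (by omega) (ih (m + 1) _)

theorem cInt_shift (R : List Int) (m pm d : Int) (hd : m + 1 ≤ d) :
    cInt R (m + 1) (min d (pm + 1)) = min d (cInt R m pm + 1) := by
  induction R generalizing m pm with
  | nil => simp [cInt]; omega
  | cons v rest ih =>
    simp only [cInt]
    have hpm : min (min d (pm + 1)) (v + (m + 1)) = min d (min pm (v + m) + 1) := by omega
    rw [hpm]
    by_cases h1 : min pm (v + m) < m + 1
    · -- inner loop stops at this step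
      have : min d (min pm (v + m) + 1) < m + 1 + 1 := by omega
      simp only [if_pos h1, if_pos this]
      omega
    · simp only [if_neg h1]
      by_cases h2 : min d (min pm (v + m) + 1) < m + 1 + 1
      · -- outer stops because d = m + 1
        have hdm : d = m + 1 := by omega
        simp only [if_pos h2]
        have := cInt_ge rest (m + 1) (min pm (v + m))
        omega
      · simp only [if_neg h2]
        have : m + 1 + 1 ≤ d := by omega
        exact ih (m + 1) (min pm (v + m)) this

theorem cInt_head (R : List Int) (pm : Int) (h : ∀ x ∈ R, x ≤ pm) :
    cInt R 0 pm = goOpt R 0 none := by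
  cases R with
  | nil => rfl
  | cons v rest =>
    have hv : v ≤ pm := h v (by simp)
    simp only [cInt, goOpt]
    have : min pm (v + 0) = v + 0 := by omega
    rw [this, goOpt_some]

theorem goOpt_cons (d : Int) (R : List Int) (h : ∀ x ∈ R, x ≤ d) :
    goOpt (d :: R) 0 none = if d < 1 then 0 else min d (goOpt R 0 none + 1) := by
  simp only [goOpt]
  by_cases hd : d + 0 < 0 + 1
  · rw [if_pos hd, if_pos (by omega)]
  · rw [if_neg hd, if_neg (by omega), goOpt_some]
    have h2 : min d (d + 1) = d := by omega
    have hs := cInt_shift R 0 d d (by omega)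
    rw [h2] at hs
    norm_num at hs ⊢
    rw [hs, cInt_head R d h]

theorem gfold_ge (T : List Int) (s : Int) : s ≤ T.foldl gstep s := by
  induction T generalizing s with
  | nil => simp
  | cons v rest ih =>
    simp only [List.foldl]
    refine le_trans ?_ (ih (gstep s v))
    simp only [gstep]; split <;> omega

theorem gfold_bound (T : List Int) (s d : Int) (h : ∀ x ∈ T, x ≤ d) (hs : s ≤ d + 1) :
    T.foldl gstep s ≤ d + 1 := by
  induction T generalizing s with
  | nil => simpa
  | cons v rest ih =>
    simp only [List.foldl]
    refine ih _ (fun x hx => h x (List.mem_cons_of_mem _ hx)) ?_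
    have hv : v ≤ d := h v (List.mem_cons_self ..)
    simp only [gstep]; split <;> omega

theorem gfold_zero (T : List Int) (s : Int) (h : ∀ x ∈ T, x ≤ 0) (hs : 1 ≤ s) :
    T.foldl gstep s = s := by
  induction T generalizing s with
  | nil => rfl
  | cons v rest ih =>
    have hv : v ≤ 0 := h v (List.mem_cons_self ..)
    simp only [List.foldl, gstep]
    rw [if_neg (by omega)]
    exact ih s (fun x hx => h x (List.mem_cons_of_mem _ hx)) hs

-- the core equivalence: Hall-style descending scan = ascending greedy, on a sorted list
theorem main_core (T : List Int) (hT : T.Pairwise (· ≤ ·)) :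
    goOpt T.reverse 0 none = T.foldl gstep 1 - 1 := by
  induction T using List.reverseRecOn with
  | nil => simp [goOpt]
  | append_singleton T' d ih =>
    have hsplit := List.pairwise_append.mp hT
    have hT' : T'.Pairwise (· ≤ ·) := hsplit.1
    have hle : ∀ x ∈ T', x ≤ d := fun x hx => hsplit.2.2 x hx d (by simp)
    have hle' : ∀ x ∈ T'.reverse, x ≤ d := fun x hx => hle x (List.mem_reverse.mp hx)
    rw [List.reverse_append, List.reverse_singleton, List.singleton_append,
      goOpt_cons d T'.reverse hle', ih hT', List.foldl_append]
    simp only [List.foldl, gstep]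
    have hg1 : 1 ≤ T'.foldl gstep 1 := gfold_ge T' 1
    by_cases hd : d ≥ T'.foldl gstep 1
    · rw [if_pos hd, if_neg (by omega)]; omega
    · rw [if_neg hd]
      by_cases hd1 : d < 1
      · rw [if_pos hd1]
        have := gfold_zero T' 1 (fun x hx => le_trans (hle x hx) (by omega)) le_rfl
        omega
      · rw [if_neg hd1]
        have := gfold_bound T' 1 d hle (by omega)
        omega

-- bridge: A's index loop = fold over the first N sorted elements
theorem loopA_eq (L : List Int) (k i : Nat) (s : Int) (h : i + k ≤ L.length) :
    solveLoopA L ((i : Int) + k) i s = ((L.drop i).take k).foldl gstep s := by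
  induction k generalizing i s with
  | zero =>
    rw [solveLoopA]
    simp
  | succ k ih =>
    have hi : i < L.length := by omega
    rw [solveLoopA, dif_pos (by push_cast; omega)]
    have hget : PySem.List.pyGetD L (i : Int) 0 = L[i] := by
      rw [PySem.List.pyGetD_natCast]; simp [List.getD, hi]
    rw [hget]
    conv_rhs => rw [List.drop_eq_getElem_cons hi, List.take_succ_cons, List.foldl_cons]
    have heq := ih (i + 1) (gstep s L[i]) (by omega)
    have hc2 : ((i : Nat) : Int) + ((k + 1 : Nat) : Int) = (((i + 1 : Nat)) : Int) + (k : Int) := by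
      push_cast; ring
    have hc : ((i : Nat) : Int) + 1 = (((i + 1 : Nat)) : Int) := by push_cast; ring
    rw [hc2, hc, show (if L[i] ≥ s then s + 1 else s) = gstep s L[i] from rfl, heq]

-- bridge: B's index loop = goOpt over the reversed first-n prefix
theorem loopB_eq (L : List Int) (n : Nat) (hn : n ≤ L.length) (k m : Nat) (pm : Option Int)
    (hk : m + k = n) :
    solveLoopB L n m pm = goOpt (((L.take n).reverse).drop m) m pm := by
  induction k generalizing m pm with
  | zero =>
    have hm : m = n := by omega
    rw [solveLoopB, dif_neg (by omega)]
    rw [List.drop_eq_nil_of_le (by simp; omega)]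
    rfl
  | succ k ih =>
    have hm : m < n := by omega
    have htl : (L.take n).length = n := by rw [List.length_take]; omega
    have hmr : m < ((L.take n).reverse).length := by simp [htl]; omega
    rw [solveLoopB, dif_pos (by omega)]
    have hidx : (n : Int) - 1 - m = ((n - 1 - m : Nat) : Int) := by omega
    have hlt : n - 1 - m < L.length := by omega
    have hget : PySem.List.pyGetD L ((n : Int) - 1 - m) 0 = L[n - 1 - m] := by
      rw [hidx, PySem.List.pyGetD_natCast]; simp [List.getD, hlt]
    have hrev : ((L.take n).reverse)[m] = L[n - 1 - m]'hlt := by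
      rw [List.getElem_reverse, List.getElem_take]
      congr 1
      omega
    have hdrop : ((L.take n).reverse).drop m
        = ((L.take n).reverse)[m] :: ((L.take n).reverse).drop (m + 1) :=
      List.drop_eq_getElem_cons hmr
    have hstep : ∀ pm' : Option Int, solveLoopB L n ((m : Int) + 1) pm'
        = goOpt (((L.take n).reverse).drop (m + 1)) ((m : Int) + 1) pm' := by
      intro pm'
      have := ih (m + 1) pm' (by omega)
      push_cast at this
      exact this
    rw [hget, hdrop, hrev]
    cases pm <;> simp only [goOpt] <;> rw [hstep]

-- ===== VERDICT (by name: the statement is the Claim_ definition above) =====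
theorem solve_spec : Claim_equal_solve := by
  intro N S _hdom hpre
  unfold Spec_solve solve solve_alt
  set L := PySem.List.sorted S (fun x => x) false with hLdef
  show solveLoopA L N 0 1 - 1 = solveLoopB L N 0 none
  have hlen : L.length = S.length := PySem.List.length_sorted ..
  have hpw : L.Pairwise (· ≤ ·) := PySem.List.sorted_pairwise ..
  by_cases hN : N ≤ 0
  · rw [solveLoopA, solveLoopB, dif_neg (by omega), dif_neg (by omega)]
    omega
  · have h0 : 0 ≤ N := by omega
    have hNn : N = ((N.toNat : Nat) : Int) := by omega
    have hNl : N.toNat ≤ L.length := by unfold Pre_solve at hpre; omega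
    have hA := loopA_eq L N.toNat 0 1 (by omega)
    have hB := loopB_eq L N.toNat hNl N.toNat 0 none (by omega)
    simp only [Nat.cast_zero, zero_add, List.drop_zero] at hA hB
    rw [hNn, hA, hB]
    have hpwT : (L.take N.toNat).Pairwise (· ≤ ·) :=
      hpw.sublist (List.take_sublist _ _)
    rw [main_core (L.take N.toNat) hpwT]
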